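-- pv_equiv track=rewrite | github.com/miliar/Code_Jam_Webscraper | solutions_python/solutions_year16_round1_nr1/1868.py | solve
-- ===== SOURCE A (Python) =====
-- from collections import deque
--
-- def solve(case: str):
--     letters = deque(case)
--     result = deque()
--     result.append(letters.popleft())
--
--     if case.__len__() > 1:
--         while letters:
--             value = letters.popleft()
--             if value >= result[0]:
--                 result.appendleft(value)
--             else:
--                 result.append(value)
--
--     return ''.join(result)
-- ===== SOURCE B (Python) =====
-- def solve(case: str):
--     keep = [case[i] >= max(case[:i + 1]) for i in range(len(case))]
--     front = ''.join(case[i] for i in reversed(range(len(case))) if keep[i])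
--     back = ''.join(case[i] for i in range(len(case)) if not keep[i])
--     return front + back
-- ===== Notes on version B (the rewrite author's own statement) =====
-- stated objective: alternative
-- what changed: Replaced A's stateful deque simulation (popleft each char, compare with the deque front, appendleft/append) by a declarative three-stage construction: mark each position i whose char is a prefix maximum (case[i] >= max(case[:i+1])), join the marked chars scanned right-to-left, join the unmarked chars left-to-right, and concatenate; it trades A's O(n) single pass for O(n^2) slice maxima in exchange for a stateless, comprehension-based formulation.
import Mathlib
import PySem

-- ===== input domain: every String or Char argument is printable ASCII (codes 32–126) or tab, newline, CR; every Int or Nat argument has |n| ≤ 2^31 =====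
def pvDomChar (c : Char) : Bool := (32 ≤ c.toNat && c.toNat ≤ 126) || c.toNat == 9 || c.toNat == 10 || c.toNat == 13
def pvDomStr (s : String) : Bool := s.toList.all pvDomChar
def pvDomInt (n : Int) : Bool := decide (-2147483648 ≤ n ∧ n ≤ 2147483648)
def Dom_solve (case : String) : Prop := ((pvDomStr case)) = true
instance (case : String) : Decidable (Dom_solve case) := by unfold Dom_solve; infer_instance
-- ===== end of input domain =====

-- Header: B replaces A's stateful deque simulation by a stateless three-stage
-- construction — mark the prefix-maximum positions, join the marked chars scanned
-- right-to-left, join the unmarked chars left-to-right, concatenate; objective: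
-- alternative (declarative) formulation, O(n^2) instead of A's O(n).

-- ===== PORT A =====
-- one deque step: value >= result[0] prepends, else appends (result is never empty)
def solveStepA (res : List Char) (v : Char) : List Char :=
  match res with
  | f :: _ => if f ≤ v then v :: res else res ++ [v]
  | [] => res ++ [v]   -- unreachable: result always starts non-empty

def solve (case : String) : String :=
  match case.toList with
  | [] => ""   -- Python raises IndexError here; excluded by Pre_solve
  | c :: rest => String.mk (rest.foldl solveStepA [c])

-- ===== PORT B =====
-- Python max() over a nonempty string slice (the [] arm is unreachable in B)
def pyMaxChar (xs : List Char) : Char :=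
  match xs with
  | [] => default
  | x :: t => t.foldl max x

def solve_alt (case : String) : String :=
  let l := case.toList
  let keep := (List.range l.length).map
      (fun i => decide (pyMaxChar (l.take (i + 1)) ≤ l.getD i default))
  let front := ((List.range l.length).reverse.filter (fun i => keep.getD i false)).map
      (fun i => l.getD i default)
  let back := ((List.range l.length).filter (fun i => !(keep.getD i false))).map
      (fun i => l.getD i default)
  String.mk (front ++ back)

-- ===== PRECONDITION & SPEC =====
-- Pre_ excludes only the empty string, on which A raises IndexError (popleft of an empty deque).
def Pre_solve (case : String) : Prop := case ≠ ""
instance (case : String) : Decidable (Pre_solve case) := by unfold Pre_solve; infer_instance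
def pvWitness_solve : String := "ba"

def Spec_solve (case : String) (out : String) : Prop := out = solve_alt case
instance (case : String) (out : String) : Decidable (Spec_solve case out) := by unfold Spec_solve; infer_instance

-- ===== CLAIM (what is proved, stated in full; the proofs are below) =====
def Claim_equal_solve : Prop := ∀ (case : String), Dom_solve case → Pre_solve case → Spec_solve case (solve case)

-- ===== LEMMAS AND PROOFS =====

-- the mark at position i (B's keep list, read through getD)
def keepB (l : List Char) (i : Nat) : Bool :=
  decide (pyMaxChar (l.take (i + 1)) ≤ l.getD i default)

-- B's two stages in index-free form
def frontB (l : List Char) : List Char :=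
  ((List.range l.length).filter (fun i => keepB l i)).map (fun i => l.getD i default)
def backB (l : List Char) : List Char :=
  ((List.range l.length).filter (fun i => !(keepB l i))).map (fun i => l.getD i default)

theorem keep_getD (l : List Char) (i : Nat) (hi : i < l.length) :
    (((List.range l.length).map
      (fun j => decide (pyMaxChar (l.take (j + 1)) ≤ l.getD j default))).getD i false)
      = keepB l i := by
  unfold keepB
  rw [List.getD_eq_getElem?_getD, List.getElem?_map, List.getElem?_range hi]
  simp

theorem getD_append_lt (l : List Char) (v : Char) (i : Nat) (hi : i < l.length) :
    (l ++ [v]).getD i default = l.getD i default := by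
  rw [List.getD_eq_getElem?_getD, List.getD_eq_getElem?_getD, List.getElem?_append_left hi]

theorem keepB_append_lt (l : List Char) (v : Char) (i : Nat) (hi : i < l.length) :
    keepB (l ++ [v]) i = keepB l i := by
  unfold keepB
  rw [List.take_append_of_le_length hi, getD_append_lt l v i hi]

theorem pyMaxChar_append (l : List Char) (v : Char) (hne : l ≠ []) :
    pyMaxChar (l ++ [v]) = max (pyMaxChar l) v := by
  cases l with
  | nil => exact absurd rfl hne
  | cons x t => simp [pyMaxChar, List.foldl_append]

theorem keepB_append_last (l : List Char) (v : Char) (hne : l ≠ []) :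
    keepB (l ++ [v]) l.length = decide (pyMaxChar l ≤ v) := by
  unfold keepB
  have h1 : (l ++ [v]).take (l.length + 1) = l ++ [v] := by
    apply List.take_of_length_le; simp
  have h2 : (l ++ [v]).getD l.length default = v := by simp
  rw [h1, h2, pyMaxChar_append l v hne]
  by_cases h : pyMaxChar l ≤ v
  · simp [h]
  · simp [h]

theorem frontB_append (l : List Char) (v : Char) (hne : l ≠ []) :
    frontB (l ++ [v])
      = frontB l ++ (if pyMaxChar l ≤ v then [v] else []) := by
  unfold frontB
  have hlen : (l ++ [v]).length = l.length + 1 := by simp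
  rw [hlen, List.range_succ, List.filter_append, List.map_append]
  congr 1
  · -- the range l.length part agrees with frontB l
    have hf : (List.range l.length).filter (fun i => keepB (l ++ [v]) i)
        = (List.range l.length).filter (fun i => keepB l i) := by
      apply List.filter_congr
      intro i hi
      exact keepB_append_lt l v i (List.mem_range.mp hi)
    rw [hf]
    apply List.map_congr_left
    intro i hi
    have : i < l.length := List.mem_range.mp (List.mem_of_mem_filter hi)
    exact getD_append_lt l v i this
  · have hsing : [l.length].filter (fun i => keepB (l ++ [v]) i)
        = if keepB (l ++ [v]) l.length then [l.length] else [] := by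
      cases hk : keepB (l ++ [v]) l.length <;> simp [List.filter, hk]
    rw [hsing, keepB_append_last l v hne]
    by_cases h : pyMaxChar l ≤ v
    · simp [h]
    · simp [h]

theorem backB_append (l : List Char) (v : Char) (hne : l ≠ []) :
    backB (l ++ [v])
      = backB l ++ (if pyMaxChar l ≤ v then [] else [v]) := by
  unfold backB
  have hlen : (l ++ [v]).length = l.length + 1 := by simp
  rw [hlen, List.range_succ, List.filter_append, List.map_append]
  congr 1
  · have hf : (List.range l.length).filter (fun i => !(keepB (l ++ [v]) i))
        = (List.range l.length).filter (fun i => !(keepB l i)) := by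
      apply List.filter_congr
      intro i hi
      rw [keepB_append_lt l v i (List.mem_range.mp hi)]
    rw [hf]
    apply List.map_congr_left
    intro i hi
    have : i < l.length := List.mem_range.mp (List.mem_of_mem_filter hi)
    exact getD_append_lt l v i this
  · have hsing : [l.length].filter (fun i => !(keepB (l ++ [v]) i))
        = if !(keepB (l ++ [v]) l.length) then [l.length] else [] := by
      cases hk : keepB (l ++ [v]) l.length <;> simp [List.filter, hk]
    rw [hsing, keepB_append_last l v hne]
    by_cases h : pyMaxChar l ≤ v
    · simp [h]
    · simp [h]

-- the body of A's port as a function of the char list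
def bodyA (l : List Char) : List Char :=
  match l with
  | [] => []
  | c :: rest => rest.foldl solveStepA [c]

theorem bodyA_append (l : List Char) (v : Char) (hne : l ≠ []) :
    bodyA (l ++ [v]) = solveStepA (bodyA l) v := by
  cases l with
  | nil => exact absurd rfl hne
  | cons c rest => simp [bodyA, List.foldl_append]

-- main invariant: A's deque equals reversed marked chars ++ unmarked chars,
-- and the last marked char is the running maximum
theorem main_inv (l : List Char) (hne : l ≠ []) :
    bodyA l = (frontB l).reverse ++ backB l
    ∧ (frontB l).getLast? = some (pyMaxChar l) := by
  induction l using List.reverseRecOn with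
  | nil => exact absurd rfl hne
  | append_singleton l v ih =>
    by_cases hl : l = []
    · subst hl
      refine ⟨?_, ?_⟩
      · simp [bodyA, frontB, backB, keepB, pyMaxChar, List.range_succ]
      · simp [frontB, keepB, pyMaxChar, List.range_succ]
    · obtain ⟨ihA, ihM⟩ := ih hl
      have hhead : (frontB l).reverse.head? = some (pyMaxChar l) := by
        rw [List.head?_reverse]; exact ihM
      obtain ⟨tl, htl⟩ : ∃ tl, (frontB l).reverse = pyMaxChar l :: tl := by
        cases hr : (frontB l).reverse with
        | nil => rw [hr] at hhead; simp at hhead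
        | cons a b => rw [hr] at hhead; simp at hhead; exact ⟨b, by rw [hhead]⟩
      rw [bodyA_append l v hl, ihA, frontB_append l v hl, backB_append l v hl,
          pyMaxChar_append l v hl]
      by_cases h : pyMaxChar l ≤ v
      · have hstep : solveStepA ((frontB l).reverse ++ backB l) v
            = v :: ((frontB l).reverse ++ backB l) := by
          rw [htl]; simp [solveStepA, h]
        rw [hstep]
        refine ⟨by simp [h], ?_⟩
        simp [h]
      · have hstep : solveStepA ((frontB l).reverse ++ backB l) v
            = ((frontB l).reverse ++ backB l) ++ [v] := by
          rw [htl]; simp [solveStepA, h]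
        rw [hstep]
        have hmax : max (pyMaxChar l) v = pyMaxChar l :=
          max_eq_left (le_of_lt (lt_of_not_ge h))
        exact ⟨by simp [h], by simp [h, hmax, ihM]⟩

theorem solve_eq_bodyA (case : String) : solve case = String.mk (bodyA case.toList) := by
  unfold solve bodyA
  cases case.toList <;> rfl

theorem solve_alt_eq (case : String) :
    solve_alt case = String.mk ((frontB case.toList).reverse ++ backB case.toList) := by
  simp only [solve_alt]
  congr 1
  congr 1
  · rw [List.filter_reverse, List.map_reverse]
    unfold frontB
    congr 2
    apply List.filter_congr
    intro i hi
    rw [keep_getD case.toList i (List.mem_range.mp hi)]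
  · unfold backB
    congr 1
    apply List.filter_congr
    intro i hi
    rw [keep_getD case.toList i (List.mem_range.mp hi)]

-- ===== VERDICT (by name: the statement is the Claim_ definition above) =====
theorem solve_spec : Claim_equal_solve := by
  intro case _ hpre
  unfold Spec_solve
  have hlne : case.toList ≠ [] := by
    intro h; apply hpre; cases case; simp_all
  rw [solve_eq_bodyA, solve_alt_eq, (main_inv case.toList hlne).1]
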